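-- pv_equiv track=rewrite | github.com/jaysooo/Algorithm | problem-solving/company_problem/sk_exam/Movie/main.py | solution
-- ===== SOURCE A (Python) =====
-- def solution(movie):
--     answer = []
--     movie_dict={}
--     for item in movie:
--         if item in movie_dict:
--             cur=movie_dict[item]
--             movie_dict[item]=(cur+1)
--         else:
--             movie_dict[item]=1
--
--     answer=sorted(sorted(movie_dict), key=movie_dict.__getitem__,reverse=True)
--
--     return answer
-- ===== SOURCE B (Python) =====
-- def solution(movie):
--     freq = {}
--     for m in movie:
--         freq[m] = freq.get(m, 0) + 1
--     if not freq:
--         return []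
--     buckets = {}
--     for k in sorted(freq):
--         buckets.setdefault(freq[k], []).append(k)
--     answer = []
--     for c in range(max(freq.values()), 0, -1):
--         answer.extend(buckets.get(c, []))
--     return answer
-- ===== Notes on version B (the rewrite author's own statement) =====
-- stated objective: alternative
-- what changed: Replaces A's double stable sort (ascending by name, then stable reverse sort by count) with one counting pass, a single ascending sort of the distinct keys grouped into per-count buckets, and a sweep over counts from the maximum down to 1 concatenating the buckets; no reverse sort is performed.
import Mathlib
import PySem

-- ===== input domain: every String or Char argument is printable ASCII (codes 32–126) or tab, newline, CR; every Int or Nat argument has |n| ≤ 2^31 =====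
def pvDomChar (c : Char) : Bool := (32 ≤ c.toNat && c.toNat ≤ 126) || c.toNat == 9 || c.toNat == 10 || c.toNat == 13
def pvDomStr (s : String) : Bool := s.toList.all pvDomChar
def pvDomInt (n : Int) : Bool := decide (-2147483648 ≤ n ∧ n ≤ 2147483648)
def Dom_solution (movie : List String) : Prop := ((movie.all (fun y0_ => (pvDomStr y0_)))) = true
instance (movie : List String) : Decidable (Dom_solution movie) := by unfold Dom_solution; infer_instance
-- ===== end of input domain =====

-- B replaces A's double stable sort with a counting pass, a single ascending sort of the
-- distinct keys, and a sweep over counts from the maximum down to 1 (objective: alternative).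

-- ===== PORT A =====
def solution (movie : List String) : List String :=
  let movie_dict := movie.foldl (fun d item =>
    if d.contains item then d.insert item (d.getD item 0 + 1)
    else d.insert item 1) (PySem.Dict.empty : PySem.Dict String Int)
  -- movie_dict.__getitem__ is only applied to movie_dict's own keys here, so getD is exact
  PySem.List.sorted (PySem.List.sorted movie_dict.keys (fun x => x))
    (fun k => movie_dict.getD k 0) true

-- ===== PORT B =====
def solution_alt (movie : List String) : List String :=
  let freq := movie.foldl (fun d m => d.insert m (d.getD m 0 + 1)) (PySem.Dict.empty : PySem.Dict String Int)
  if freq.items.isEmpty then []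
  else
    -- buckets.setdefault(freq[k], []).append(k) : look up the key's list (default []) and
    -- store it back with k appended — value-identical to Python's in-place append
    let buckets := (PySem.List.sorted freq.keys (fun x => x)).foldl
        (fun b k => b.insert (freq.getD k 0) (b.getD (freq.getD k 0) [] ++ [k]))
        (PySem.Dict.empty : PySem.Dict Int (List String))
    -- max(freq.values()) : the list is nonempty on this branch, so getD 0 is exact
    let maxc := (PySem.List.max? freq.values (fun x => x)).getD 0
    (PySem.List.pyRange maxc 0 (-1)).foldl (fun acc c => acc ++ buckets.getD c []) []

-- ===== PRECONDITION & SPEC =====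
def Spec_solution (movie : List String) (out : List String) : Prop := out = solution_alt movie
instance (movie : List String) (out : List String) : Decidable (Spec_solution movie out) := by unfold Spec_solution; infer_instance

-- ===== CLAIM (what is proved, stated in full; the proofs are below) =====
def Claim_equal_solution : Prop := ∀ (movie : List String), Dom_solution movie → Spec_solution movie (solution movie)

-- ===== LEMMAS AND PROOFS =====

theorem pv_foldl_ext {α β : Type} {f g : β → α → β} (h : ∀ b a, f b a = g b a) :
    ∀ (l : List α) (b : β), l.foldl f b = l.foldl g b := by
  intro l
  induction l with
  | nil => intro b; rfl
  | cons a l ih => intro b; rw [List.foldl_cons, List.foldl_cons, h, ih]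

-- Both counting loops build collections.Counter(movie).
theorem dictA_eq_counter (movie : List String) :
    movie.foldl (fun d item =>
      if d.contains item then d.insert item (d.getD item 0 + 1)
      else d.insert item 1) (PySem.Dict.empty : PySem.Dict String Int) = PySem.Dict.counter movie := by
  unfold PySem.Dict.counter
  apply pv_foldl_ext
  intro d x
  by_cases h : d.contains x = true
  · simp [h, PySem.Dict.modify]
  · have hnone : d.get? x = none := by
      rw [PySem.Dict.get?_eq_none_iff_contains]
      simpa using h
    simp [h, PySem.Dict.modify, PySem.Dict.getD, hnone]

theorem dictB_eq_counter (movie : List String) :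
    movie.foldl (fun d m => d.insert m (d.getD m 0 + 1)) (PySem.Dict.empty : PySem.Dict String Int)
      = PySem.Dict.counter movie := rfl

theorem pyRange_desc_nil (m : Int) (h : m ≤ 0) : PySem.List.pyRange m 0 (-1) = [] := by
  rw [PySem.List.pyRange]
  norm_num
  intro
  omega

theorem pyRange_desc_cons (m : Int) (h : 1 ≤ m) :
    PySem.List.pyRange m 0 (-1) = m :: PySem.List.pyRange (m - 1) 0 (-1) := by
  rw [PySem.List.pyRange, PySem.List.pyRange]
  norm_num
  rw [if_pos (by omega : (0:Int) < m)]
  have h2 : (if 1 < m then m.toNat - 1 else 0) = m.toNat - 1 := by split <;> omega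
  rw [h2]
  obtain ⟨n, hn⟩ : ∃ n, m.toNat = n + 1 := ⟨m.toNat - 1, by omega⟩
  rw [hn]
  simp only [List.range_succ_eq_map, Nat.add_sub_cancel, List.map_cons, List.map_map]
  congr 1
  · omega
  · apply List.map_congr_left
    intro a _
    simp only [Function.comp_apply, Nat.succ_eq_add_one]
    push_cast
    ring

theorem mem_pyRange_desc : ∀ (n : ℕ) (v : Int), v ∈ PySem.List.pyRange (n : Int) 0 (-1) → 1 ≤ v ∧ v ≤ n := by
  intro n
  induction n with
  | zero => intro v hv; rw [pyRange_desc_nil ((0:ℕ):Int) (by norm_num)] at hv; simp at hv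
  | succ k ih =>
    intro v hv
    rw [pyRange_desc_cons ((k+1 : ℕ) : Int) (by push_cast; omega)] at hv
    rcases List.mem_cons.mp hv with h | h
    · constructor <;> omega
    · have : ((k+1 : ℕ) : Int) - 1 = (k : Int) := by push_cast; ring
      rw [this] at h
      have := ih v h
      constructor <;> omega

theorem pv_flatMap_congr {α β : Type} (g g' : α → List β) (l : List α)
    (h : ∀ a ∈ l, g a = g' a) : l.flatMap g = l.flatMap g' := by
  induction l with
  | nil => rfl
  | cons a l ih =>
    simp only [List.flatMap_cons, h a (by simp), ih (fun a ha => h a (by simp [ha]))]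

-- insertBy walks past a prefix it does not go before
theorem insertBy_skip {α : Type} (before : α → α → Bool) (x : α) (A B : List α)
    (h : ∀ y ∈ A, before x y = false) :
    PySem.List.insertBy before x (A ++ B) = A ++ PySem.List.insertBy before x B := by
  induction A with
  | nil => simp
  | cons a A ih =>
    have ha : before x a = false := h a (by simp)
    have hstep : PySem.List.insertBy before x (a :: (A ++ B))
        = if before x a then x :: a :: (A ++ B) else a :: PySem.List.insertBy before x (A ++ B) := rfl
    simp only [List.cons_append, hstep, ha, Bool.false_eq_true, ite_false]
    rw [ih (fun y hy => h y (by simp [hy]))]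

theorem insertBy_front {α : Type} (before : α → α → Bool) (x : α) (B : List α)
    (h : ∀ y ∈ B, before x y = true) :
    PySem.List.insertBy before x B = x :: B := by
  cases B with
  | nil => rfl
  | cons b B =>
    have hstep : PySem.List.insertBy before x (b :: B)
        = if before x b then x :: b :: B else b :: PySem.List.insertBy before x B := rfl
    simp [hstep, h b (by simp)]

-- inserting x into the count-descending bucket concatenation lands at the end of bucket (c x)
theorem ins_bucket_nat {α : Type} (c : α → Int) (x : α) (h1 : 1 ≤ c x) :
    ∀ (n : ℕ) (P : List α), c x ≤ n →
    PySem.List.insertBy (fun a b => decide (c b < c a)) x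
        ((PySem.List.pyRange (n : Int) 0 (-1)).flatMap (fun v => P.filter (fun k => c k == v)))
      = (PySem.List.pyRange (n : Int) 0 (-1)).flatMap (fun v => (P ++ [x]).filter (fun k => c k == v)) := by
  intro n
  induction n with
  | zero => intro P h2; omega
  | succ k ih =>
    intro P h2
    have hcast : ((k+1 : ℕ) : Int) - 1 = (k : Int) := by push_cast; ring
    rw [pyRange_desc_cons ((k+1 : ℕ) : Int) (by push_cast; omega), hcast,
        List.flatMap_cons, List.flatMap_cons]
    by_cases hcx : c x = ((k+1 : ℕ) : Int)
    · rw [insertBy_skip _ _ _ _ ?_, insertBy_front _ _ _ ?_]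
      · have hhead : (P ++ [x]).filter (fun k' => c k' == ((k+1 : ℕ) : Int))
            = P.filter (fun k' => c k' == ((k+1 : ℕ) : Int)) ++ [x] := by
          rw [List.filter_append]
          simp [hcx]
        have htail : (PySem.List.pyRange (k : Int) 0 (-1)).flatMap (fun v => (P ++ [x]).filter (fun k' => c k' == v))
            = (PySem.List.pyRange (k : Int) 0 (-1)).flatMap (fun v => P.filter (fun k' => c k' == v)) := by
          apply pv_flatMap_congr
          intro v hv
          have hb := mem_pyRange_desc k v hv
          rw [List.filter_append]
          simp only [List.filter_cons, List.filter_nil]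
          have : (c x == v) = false := by simp; omega
          simp [this]
        rw [hhead, htail]
        simp
      · intro y hy
        obtain ⟨v, hv, hy'⟩ := List.mem_flatMap.mp hy
        have hb := mem_pyRange_desc k v hv
        have : c y = v := by simpa using (List.of_mem_filter hy')
        simp
        omega
      · intro y hy
        have : c y = ((k+1 : ℕ) : Int) := by simpa using (List.of_mem_filter hy)
        simp
        omega
    · have hle : c x ≤ (k : ℕ) := by push_cast at h2 hcx ⊢; omega
      rw [insertBy_skip _ _ _ _ ?_]
      · rw [ih P hle]
        have hhead : (P ++ [x]).filter (fun k' => c k' == ((k+1 : ℕ) : Int))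
            = P.filter (fun k' => c k' == ((k+1 : ℕ) : Int)) := by
          rw [List.filter_append]
          simp
          push_cast at hcx
          omega
        rw [hhead]
      · intro y hy
        have : c y = ((k+1 : ℕ) : Int) := by simpa using (List.of_mem_filter hy)
        simp
        push_cast at this ⊢
        omega

-- a stable reverse sort by count IS the count-descending bucket concatenation
theorem stable_rev_bucket {α : Type} (c : α → Int) (m : Int) (P : List α)
    (h : ∀ x ∈ P, 1 ≤ c x ∧ c x ≤ m) :
    PySem.List.sorted P c true
      = (PySem.List.pyRange m 0 (-1)).flatMap (fun v => P.filter (fun k => c k == v)) := by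
  induction P using List.reverseRecOn with
  | nil => simp [PySem.List.sorted]
  | append_singleton P x ih =>
    have hx := h x (by simp)
    have hm1 : 1 ≤ m := le_trans hx.1 hx.2
    have hmm : m = ((m.toNat : ℕ) : Int) := by omega
    rw [PySem.List.sorted_rev_eq_foldl_insertBy, List.foldl_append, List.foldl_cons, List.foldl_nil,
        ← PySem.List.sorted_rev_eq_foldl_insertBy,
        ih (fun y hy => h y (by simp [hy])), hmm]
    exact ins_bucket_nat c x hx.1 m.toNat P (by omega)

-- each bucket of the grouping fold is the filter of its count
theorem bucket_fold_getD (c : String → Int) (K : List String) (v : Int) :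
    ((K.foldl (fun b k => b.insert (c k) (b.getD (c k) [] ++ [k]))
        (PySem.Dict.empty : PySem.Dict Int (List String))).getD v [])
      = K.filter (fun k => c k == v) := by
  induction K using List.reverseRecOn with
  | nil => simp [PySem.Dict.getD, PySem.Dict.get?_empty]
  | append_singleton K x ih =>
    rw [List.foldl_append, List.foldl_cons, List.foldl_nil, PySem.Dict.getD_insert,
        List.filter_append]
    by_cases hv : v = c x
    · subst hv
      rw [if_pos rfl, ih]
      simp
    · rw [if_neg hv, ih]
      have : (c x == v) = false := by simpa using fun hh => hv hh.symm
      simp [this]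

-- the count-descending sweep over the buckets is a flatMap of filters
theorem sweep_eq_flatMap (c : String → Int) (K : List String) (R : List Int) :
    R.foldl (fun acc v => acc ++ ((K.foldl (fun b k => b.insert (c k) (b.getD (c k) [] ++ [k]))
        (PySem.Dict.empty : PySem.Dict Int (List String))).getD v [])) []
      = R.flatMap (fun v => K.filter (fun k => c k == v)) := by
  rw [PySem.List.foldl_append_eq_flatMap, List.nil_append]
  exact pv_flatMap_congr _ _ _ (fun v _ => bucket_fold_getD c K v)

theorem solution_eq_alt (movie : List String) : solution movie = solution_alt movie := by
  cases movie with
  | nil => rfl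
  | cons a rest =>
    simp only [solution, solution_alt]
    rw [dictA_eq_counter, dictB_eq_counter]
    have hnodup := PySem.Dict.nodup_keys_counter (a :: rest)
    have hkeys := PySem.Dict.keys_counter (a :: rest)
    have hamem : a ∈ (PySem.Dict.counter (a :: rest)).keys := by
      rw [hkeys]; exact (PySem.Set.mem_ofList _ _).mpr (by simp)
    have hkeysne : (PySem.Dict.counter (a :: rest)).keys ≠ [] := by
      intro hh; rw [hh] at hamem; simp at hamem
    have hitems : (PySem.Dict.counter (a :: rest)).items.isEmpty = false := by
      rw [List.isEmpty_eq_false_iff_exists_mem]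
      have := hamem
      simp only [PySem.Dict.keys, List.mem_map] at this
      obtain ⟨p, hp, _⟩ := this
      exact ⟨p, hp⟩
    rw [hitems]
    simp only [Bool.false_eq_true, ite_false]
    have hvals := PySem.Dict.values_eq_map_keys (PySem.Dict.counter (a :: rest)) hnodup 0
    obtain ⟨M, hM⟩ : ∃ M, PySem.List.max? (PySem.Dict.counter (a :: rest)).values (fun x => x) = some M := by
      cases hmx : PySem.List.max? (PySem.Dict.counter (a :: rest)).values (fun x => x) with
      | none =>
        exfalso
        rw [PySem.List.max?_eq_none_iff, hvals, List.map_eq_nil_iff] at hmx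
        exact hkeysne hmx
      | some M => exact ⟨M, rfl⟩
    rw [hM]
    simp only [Option.getD_some]
    -- counts of keys are between 1 and M
    have hcount : ∀ k ∈ (PySem.Dict.counter (a :: rest)).keys,
        1 ≤ (PySem.Dict.counter (a :: rest)).getD k 0 ∧ (PySem.Dict.counter (a :: rest)).getD k 0 ≤ M := by
      intro k hk
      constructor
      · rw [PySem.Dict.getD_counter]
        have : k ∈ (a :: rest) := (PySem.Set.mem_ofList _ _).mp (hkeys ▸ hk)
        have := List.count_pos_iff.mpr this
        omega
      · exact PySem.List.max?_isMax hM _ (by rw [hvals]; exact List.mem_map_of_mem hk)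
    -- rewrite B's nested append loops as a flatMap of filters
    rw [sweep_eq_flatMap]
    -- A's stable reverse sort is that bucket concatenation
    apply stable_rev_bucket
    intro k hk
    exact hcount k ((PySem.List.mem_sorted _ _ _ _).mp hk)
-- ===== VERDICT (by name: the statement is the Claim_ definition above) =====
theorem solution_spec : Claim_equal_solution := by
  intro movie _
  exact solution_eq_alt movie
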